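-- pv_equiv track=rewrite | github.com/rsk170/synthea-v3.3-genomics-pipeline | scripts/build_breast_cancer_clones.py | choose_gene_from_pool
-- ===== SOURCE A (Python) =====
-- def trend_priority(later_states: list[str]) -> int:
--     if any(state in {"increasing", "decreasing"} for state in later_states):
--         return 0
--     if any(state == "stable" for state in later_states):
--         return 1
--     return 2
--
-- def choose_gene_from_pool(
--     pool: list[str],
--     available_genes: set[str],
--     gene_trends: dict[str, dict[str, str]],
--     trend_dates: list[str],
-- ) -> str | None:
--     candidates = [gene for gene in pool if gene in available_genes]
--     if not candidates:
--         return None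
--     candidates.sort(
--         key=lambda gene: (
--             trend_priority([gene_trends.get(gene, {}).get(date, "missing") for date in trend_dates]),
--             pool.index(gene),
--             gene,
--         )
--     )
--     return candidates[0]
-- ===== SOURCE B (Python) =====
-- def trend_priority(later_states: list[str]) -> int:
--     if any(state in {"increasing", "decreasing"} for state in later_states):
--         return 0
--     if any(state == "stable" for state in later_states):
--         return 1
--     return 2
--
-- def choose_gene_from_pool(pool, available_genes, gene_trends, trend_dates):
--     # Priorities computed once per gene, then a tiered linear search:
--     # first gene in pool order at the best (lowest) available priority level wins.
--     priority = {
--         gene: trend_priority(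
--             [gene_trends.get(gene, {}).get(date, "missing") for date in trend_dates]
--         )
--         for gene in pool
--         if gene in available_genes
--     }
--     for level in (0, 1, 2):
--         for gene in pool:
--             if priority.get(gene) == level:
--                 return gene
--     return None
-- ===== Notes on version B (the rewrite author's own statement) =====
-- stated objective: simpler
-- what changed: Replaces build-candidate-list-then-stable-sort-by-(priority, pool.index, name) with a dict of per-gene priorities built in one pass plus a tiered linear search: for each priority level 0,1,2 in order, scan pool left-to-right and return the first gene whose stored priority is that level; the sort and the per-candidate pool.index scans disappear.
import Mathlib
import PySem

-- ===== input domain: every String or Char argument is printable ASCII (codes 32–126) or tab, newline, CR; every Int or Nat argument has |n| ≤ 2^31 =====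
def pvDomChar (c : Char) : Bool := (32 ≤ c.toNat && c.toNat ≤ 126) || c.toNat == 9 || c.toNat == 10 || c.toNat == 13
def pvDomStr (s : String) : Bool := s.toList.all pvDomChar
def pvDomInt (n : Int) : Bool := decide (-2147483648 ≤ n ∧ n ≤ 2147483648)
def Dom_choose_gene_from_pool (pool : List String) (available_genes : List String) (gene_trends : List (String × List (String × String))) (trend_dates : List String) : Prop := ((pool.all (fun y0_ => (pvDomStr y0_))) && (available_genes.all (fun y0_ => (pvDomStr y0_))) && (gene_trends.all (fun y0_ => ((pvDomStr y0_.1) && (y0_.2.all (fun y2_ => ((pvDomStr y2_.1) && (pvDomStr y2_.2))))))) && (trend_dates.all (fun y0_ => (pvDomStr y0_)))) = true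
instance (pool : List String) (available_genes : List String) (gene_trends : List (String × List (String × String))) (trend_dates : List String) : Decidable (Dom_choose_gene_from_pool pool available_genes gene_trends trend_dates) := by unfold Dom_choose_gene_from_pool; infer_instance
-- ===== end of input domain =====

-- B replaces A's build-candidates-then-sort-by-(priority, pool.index, name) with a tiered
-- linear search over the three priority levels (simpler; no sort, no pool.index scans).

-- ===== PORT A =====
-- module helper trend_priority (shared: both A's and B's Python call it verbatim)
def trendPriority (later_states : List String) : Int :=
  if later_states.any (fun state => state == "increasing" || state == "decreasing") then 0
  else if later_states.any (fun state => state == "stable") then 1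
  else 2

-- [gene_trends.get(gene, {}).get(date, "missing") for date in trend_dates] (identical in A and B)
def geneStates (gene_trends : List (String × List (String × String))) (trend_dates : List String) (gene : String) : List String :=
  trend_dates.map (fun date =>
    PySem.Dict.getD (PySem.Dict.mk (PySem.Dict.getD (PySem.Dict.mk gene_trends) gene [])) date "missing")

def genePrio (gene_trends : List (String × List (String × String))) (trend_dates : List String) (gene : String) : Int :=
  trendPriority (geneStates gene_trends trend_dates gene)

-- pool.index(gene): every gene this is applied to is a member of pool, so index? is always some
def poolIdx (pool : List String) (gene : String) : Nat :=
  (PySem.List.index? pool gene).getD 0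

-- Python's tuple sort key (trend_priority, pool.index(gene), gene), compared lexicographically
def aBefore (pool : List String) (gene_trends : List (String × List (String × String))) (trend_dates : List String) (a b : String) : Bool :=
  decide (genePrio gene_trends trend_dates a < genePrio gene_trends trend_dates b) ||
  ((genePrio gene_trends trend_dates a == genePrio gene_trends trend_dates b) &&
    (decide (poolIdx pool a < poolIdx pool b) ||
      ((poolIdx pool a == poolIdx pool b) && decide (a < b))))

def choose_gene_from_pool (pool : List String) (available_genes : List String) (gene_trends : List (String × List (String × String))) (trend_dates : List String) : Option String :=
  let candidates := pool.filter (fun gene => PySem.Set.contains available_genes gene)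
  if candidates = [] then none
  else
    -- candidates.sort(key=…): Python's stable ascending sort, as the insertBy fold
    (candidates.foldl (fun acc gene => PySem.List.insertBy (aBefore pool gene_trends trend_dates) gene acc) []).head?

-- ===== PORT B =====
-- priority = {gene: trend_priority(…) for gene in pool if gene in available_genes}
def buildPriority (pool : List String) (available_genes : List String) (gene_trends : List (String × List (String × String))) (trend_dates : List String) : PySem.Dict String Int :=
  pool.foldl (fun d gene =>
    if PySem.Set.contains available_genes gene then
      PySem.Dict.insert d gene (genePrio gene_trends trend_dates gene)
    else d) PySem.Dict.empty

-- for level in (0, 1, 2): for gene in pool: if priority.get(gene) == level: return gene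
def pickTier (pool : List String) (priority : PySem.Dict String Int) : List Int → Option String
  | [] => none
  | level :: rest =>
    match pool.find? (fun gene => PySem.Dict.get? priority gene == some level) with
    | some gene => some gene
    | none => pickTier pool priority rest

def choose_gene_from_pool_alt (pool : List String) (available_genes : List String) (gene_trends : List (String × List (String × String))) (trend_dates : List String) : Option String :=
  pickTier pool (buildPriority pool available_genes gene_trends trend_dates) [0, 1, 2]

-- ===== PRECONDITION & SPEC =====
def Spec_choose_gene_from_pool (pool : List String) (available_genes : List String) (gene_trends : List (String × List (String × String))) (trend_dates : List String) (out : Option String) : Prop := out = choose_gene_from_pool_alt pool available_genes gene_trends trend_dates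
instance (pool : List String) (available_genes : List String) (gene_trends : List (String × List (String × String))) (trend_dates : List String) (out : Option String) : Decidable (Spec_choose_gene_from_pool pool available_genes gene_trends trend_dates out) := by unfold Spec_choose_gene_from_pool; infer_instance

-- ===== CLAIM (what is proved, stated in full; the proofs are below) =====
def Claim_equal_choose_gene_from_pool : Prop := ∀ (pool : List String) (available_genes : List String) (gene_trends : List (String × List (String × String))) (trend_dates : List String), Dom_choose_gene_from_pool pool available_genes gene_trends trend_dates → Spec_choose_gene_from_pool pool available_genes gene_trends trend_dates (choose_gene_from_pool pool available_genes gene_trends trend_dates)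

-- ===== LEMMAS AND PROOFS =====

-- a single Nat key equivalent (on pool members) to A's tuple key
def pvKey (pool : List String) (gene_trends : List (String × List (String × String))) (trend_dates : List String) (g : String) : Nat :=
  (genePrio gene_trends trend_dates g).toNat * (pool.length + 1) + poolIdx pool g

theorem genePrio_cases (gt : List (String × List (String × String))) (td : List String) (g : String) :
    genePrio gt td g = 0 ∨ genePrio gt td g = 1 ∨ genePrio gt td g = 2 := by
  unfold genePrio trendPriority
  split_ifs <;> simp

theorem poolIdx_spec (pool : List String) (g : String) (h : g ∈ pool) :
    poolIdx pool g < pool.length ∧ pool[poolIdx pool g]? = some g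
      ∧ ∀ j, j < poolIdx pool g → pool[j]? ≠ some g := by
  have hs : (PySem.List.index? pool g).isSome := (PySem.List.index?_isSome_iff pool g).2 h
  obtain ⟨n, hn⟩ := Option.isSome_iff_exists.1 hs
  obtain ⟨hk, hget, hmin⟩ := PySem.List.getElem_of_index?_eq_some hn
  have he : poolIdx pool g = n := by unfold poolIdx; rw [hn]; rfl
  rw [he]
  refine ⟨hk, by rw [List.getElem?_eq_getElem hk, hget], fun j hj hc => ?_⟩
  have hjl : j < pool.length := lt_trans hj hk
  rw [List.getElem?_eq_getElem hjl] at hc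
  exact hmin j hj (Option.some.inj hc)

theorem poolIdx_inj (pool : List String) {a b : String} (ha : a ∈ pool) (hb : b ∈ pool)
    (h : poolIdx pool a = poolIdx pool b) : a = b := by
  obtain ⟨-, hget, -⟩ := poolIdx_spec pool a ha
  obtain ⟨-, hget', -⟩ := poolIdx_spec pool b hb
  rw [h] at hget
  rw [hget] at hget'
  exact Option.some.inj hget'

theorem pvKey_inj (pool : List String) (gt : List (String × List (String × String))) (td : List String)
    {a b : String} (ha : a ∈ pool) (hb : b ∈ pool)
    (h : pvKey pool gt td a = pvKey pool gt td b) : a = b := by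
  obtain ⟨hlt, -, -⟩ := poolIdx_spec pool a ha
  obtain ⟨hlt', -, -⟩ := poolIdx_spec pool b hb
  unfold pvKey at h
  apply poolIdx_inj pool ha hb
  rcases genePrio_cases gt td a with h1 | h1 | h1 <;> rcases genePrio_cases gt td b with h2 | h2 | h2 <;>
    rw [h1, h2] at h <;> simp at h <;> omega

theorem aBefore_eq_key (pool : List String) (gt : List (String × List (String × String))) (td : List String)
    {a b : String} (ha : a ∈ pool) (hb : b ∈ pool) :
    aBefore pool gt td a b = decide (pvKey pool gt td a < pvKey pool gt td b) := by
  obtain ⟨hlta, -, -⟩ := poolIdx_spec pool a ha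
  obtain ⟨hltb, -, -⟩ := poolIdx_spec pool b hb
  unfold aBefore pvKey
  by_cases hp : genePrio gt td a = genePrio gt td b
  · by_cases hi : poolIdx pool a = poolIdx pool b
    · have hab : a = b := poolIdx_inj pool ha hb hi
      subst hab
      simp
    · have hkey : (genePrio gt td a).toNat * (pool.length + 1) + poolIdx pool a
          < (genePrio gt td b).toNat * (pool.length + 1) + poolIdx pool b
          ↔ poolIdx pool a < poolIdx pool b := by rw [hp]; omega
      simp [hp, hi]
  · have hne : (genePrio gt td a == genePrio gt td b) = false := by simp [hp]
    simp only [hne, Bool.false_and, Bool.or_false]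
    rw [show (decide (genePrio gt td a < genePrio gt td b)
        = decide ((genePrio gt td a).toNat * (pool.length + 1) + poolIdx pool a
          < (genePrio gt td b).toNat * (pool.length + 1) + poolIdx pool b)) ↔ _ from decide_eq_decide]
    rcases genePrio_cases gt td a with h1 | h1 | h1 <;> rcases genePrio_cases gt td b with h2 | h2 | h2 <;>
      rw [h1, h2] <;> simp at hp ⊢ <;> omega

theorem insertBy_congr {α : Type} (f g : α → α → Bool) (x : α) (ys : List α)
    (h : ∀ y ∈ ys, f x y = g x y) :
    PySem.List.insertBy f x ys = PySem.List.insertBy g x ys := by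
  induction ys with
  | nil => rfl
  | cons y ys ih =>
    simp only [PySem.List.insertBy]
    rw [h y (by simp)]
    split
    · rfl
    · rw [ih (fun z hz => h z (by simp [hz]))]

theorem foldl_insertBy_congr {α : Type} (S : α → Prop) (f g : α → α → Bool)
    (hfg : ∀ a b, S a → S b → f a b = g a b) :
    ∀ (xs acc : List α), (∀ x ∈ xs, S x) → (∀ x ∈ acc, S x) →
      xs.foldl (fun acc x => PySem.List.insertBy f x acc) acc
        = xs.foldl (fun acc x => PySem.List.insertBy g x acc) acc := by
  intro xs
  induction xs with
  | nil => intro acc _ _; rfl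
  | cons x xs ih =>
    intro acc hxs hacc
    simp only [List.foldl_cons]
    rw [insertBy_congr f g x acc (fun y hy => hfg x y (hxs x (by simp)) (hacc y hy))]
    refine ih _ (fun z hz => hxs z (by simp [hz])) (fun z hz => ?_)
    rcases (PySem.List.mem_insertBy g x z acc).1 hz with h | h
    · exact h ▸ hxs x (by simp)
    · exact hacc z h

-- A's result on a nonempty candidate list: the minimal-pvKey candidate
theorem A_char (pool : List String) (avail : List String) (gt : List (String × List (String × String))) (td : List String)
    (hne : pool.filter (fun gene => PySem.Set.contains avail gene) ≠ []) :
    ∃ m, choose_gene_from_pool pool avail gt td = some m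
      ∧ m ∈ pool.filter (fun gene => PySem.Set.contains avail gene)
      ∧ ∀ y ∈ pool.filter (fun gene => PySem.Set.contains avail gene), pvKey pool gt td m ≤ pvKey pool gt td y := by
  have hcongr := foldl_insertBy_congr (· ∈ pool) (aBefore pool gt td)
    (fun a b => decide (pvKey pool gt td a < pvKey pool gt td b))
    (fun a b hA hB => aBefore_eq_key pool gt td hA hB)
    (pool.filter (fun gene => PySem.Set.contains avail gene)) []
    (fun x hx => (List.mem_filter.1 hx).1) (by simp)
  unfold choose_gene_from_pool
  simp only [if_neg hne]
  rw [hcongr, ← PySem.List.sorted_eq_foldl_insertBy _ (pvKey pool gt td)]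
  cases hs : PySem.List.sorted (pool.filter (fun gene => PySem.Set.contains avail gene)) (pvKey pool gt td) with
  | nil => exact absurd ((PySem.List.sorted_eq_nil_iff _ _ _).1 hs) hne
  | cons m t =>
    refine ⟨m, rfl, ?_, PySem.List.key_head_sorted_le _ _ hs⟩
    have : m ∈ PySem.List.sorted (pool.filter (fun gene => PySem.Set.contains avail gene)) (pvKey pool gt td) := by
      rw [hs]; simp
    exact ((PySem.List.sorted_perm _ _ _).mem_iff).1 this

theorem find?_congr_mem {α : Type} (p q : α → Bool) (xs : List α)
    (h : ∀ x ∈ xs, p x = q x) : xs.find? p = xs.find? q := by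
  induction xs with
  | nil => rfl
  | cons x xs ih =>
    rw [List.find?_cons, List.find?_cons, h x (by simp)]
    split
    · rfl
    · exact ih (fun z hz => h z (by simp [hz]))

theorem buildPriority_get? (pool : List String) (avail : List String) (gt : List (String × List (String × String))) (td : List String) (g : String) :
    PySem.Dict.get? (buildPriority pool avail gt td) g
      = if PySem.Set.contains avail g = true ∧ g ∈ pool then some (genePrio gt td g) else none := by
  unfold buildPriority
  suffices H : ∀ (xs : List String) (d : PySem.Dict String Int),
      PySem.Dict.get? (xs.foldl (fun d gene =>
        if PySem.Set.contains avail gene then PySem.Dict.insert d gene (genePrio gt td gene) else d) d) g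
      = if PySem.Set.contains avail g = true ∧ g ∈ xs then some (genePrio gt td g) else PySem.Dict.get? d g by
    rw [H pool PySem.Dict.empty, PySem.Dict.get?_empty]
  intro xs
  induction xs with
  | nil => intro d; simp
  | cons x xs ih =>
    intro d
    rw [List.foldl_cons, ih]
    by_cases hP : x ∈ avail
    · by_cases hgx : g = x
      · subst hgx
        by_cases hgm : g ∈ xs <;> simp [hP, hgm, PySem.Dict.get?_insert]
      · by_cases hgm : g ∈ xs <;> simp [hP, hgm, hgx, PySem.Dict.get?_insert]
    · by_cases hgx : g = x
      · subst hgx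
        by_cases hgm : g ∈ xs <;> simp [hP, hgm]
      · by_cases hgm : g ∈ xs <;> simp [hP, hgm, hgx]

theorem find_level_eq (pool : List String) (avail : List String) (gt : List (String × List (String × String))) (td : List String) (l : Int) :
    pool.find? (fun gene => PySem.Dict.get? (buildPriority pool avail gt td) gene == some l)
      = pool.find? (fun gene => PySem.Set.contains avail gene && (genePrio gt td gene == l)) := by
  apply find?_congr_mem
  intro x hx
  rw [buildPriority_get? pool avail gt td x]
  by_cases hP : x ∈ avail <;> simp [hP, hx]

-- B via pool.find? at one level
theorem F_some (pool : List String) (avail : List String) (gt : List (String × List (String × String))) (td : List String)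
    (l : Int) {g : String}
    (h : pool.find? (fun gene => PySem.Set.contains avail gene && (genePrio gt td gene == l)) = some g) :
    g ∈ pool.filter (fun gene => PySem.Set.contains avail gene) ∧ genePrio gt td g = l ∧
      ∀ y ∈ pool.filter (fun gene => PySem.Set.contains avail gene), genePrio gt td y = l → poolIdx pool g ≤ poolIdx pool y := by
  rw [List.find?_eq_some_iff_getElem] at h
  obtain ⟨hpred, i, hi, hgi, hmin⟩ := h
  rw [Bool.and_eq_true] at hpred
  have hP : PySem.Set.contains avail g = true := hpred.1
  have hprio : genePrio gt td g = l := by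
    have := hpred.2; rwa [beq_iff_eq] at this
  have hgpool : g ∈ pool := hgi ▸ pool.getElem_mem hi
  refine ⟨List.mem_filter.2 ⟨hgpool, hP⟩, hprio, ?_⟩
  intro y hy hyl
  have hypool : y ∈ pool := (List.mem_filter.1 hy).1
  have hyP : PySem.Set.contains avail y = true := (List.mem_filter.1 hy).2
  obtain ⟨hylt, hyget, -⟩ := poolIdx_spec pool y hypool
  obtain ⟨hglt, -, hgmin⟩ := poolIdx_spec pool g hgpool
  have h1 : i ≤ poolIdx pool y := by
    by_contra hlt
    rw [not_le] at hlt
    have hbad := hmin (poolIdx pool y) hlt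
    have hyg : pool[poolIdx pool y] = y := by
      have := hyget; rwa [List.getElem?_eq_getElem hylt, Option.some_inj] at this
    rw [hyg, Bool.not_eq_eq_eq_not, Bool.not_true, Bool.and_eq_false_iff] at hbad
    rcases hbad with hbad | hbad
    · rw [hyP] at hbad; exact absurd hbad (by simp)
    · rw [hyl] at hbad; simp at hbad
  have h2 : poolIdx pool g ≤ i := by
    by_contra hlt
    rw [not_le] at hlt
    exact hgmin i hlt (by rw [List.getElem?_eq_getElem hi, hgi])
  omega

theorem F_none (pool : List String) (avail : List String) (gt : List (String × List (String × String))) (td : List String)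
    (l : Int)
    (h : pool.find? (fun gene => PySem.Set.contains avail gene && (genePrio gt td gene == l)) = none) :
    ∀ y ∈ pool.filter (fun gene => PySem.Set.contains avail gene), genePrio gt td y ≠ l := by
  intro y hy hl
  rw [List.find?_eq_none] at h
  have h2 := h y (List.mem_filter.1 hy).1
  have hp := (List.mem_filter.1 hy).2
  rw [Bool.and_eq_true] at h2
  exact h2 ⟨hp, by rw [beq_iff_eq]; exact hl⟩

theorem B_char (pool : List String) (avail : List String) (gt : List (String × List (String × String))) (td : List String)
    (hne : pool.filter (fun gene => PySem.Set.contains avail gene) ≠ []) :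
    ∃ b, choose_gene_from_pool_alt pool avail gt td = some b
      ∧ b ∈ pool.filter (fun gene => PySem.Set.contains avail gene)
      ∧ ∀ y ∈ pool.filter (fun gene => PySem.Set.contains avail gene), pvKey pool gt td b ≤ pvKey pool gt td y := by
  unfold choose_gene_from_pool_alt
  have hfind := find_level_eq pool avail gt td
  cases hF0 : pool.find? (fun gene => PySem.Set.contains avail gene && (genePrio gt td gene == (0:Int))) with
  | some g =>
    obtain ⟨hgc, hgp, hgmin⟩ := F_some pool avail gt td 0 hF0
    refine ⟨g, by simp only [pickTier, hfind, hF0], hgc, ?_⟩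
    intro y hy
    obtain ⟨hyl, -, -⟩ := poolIdx_spec pool y (List.mem_filter.1 hy).1
    obtain ⟨hgl, -, -⟩ := poolIdx_spec pool g (List.mem_filter.1 hgc).1
    unfold pvKey
    rcases genePrio_cases gt td y with h | h | h
    · rw [hgp, h]; simp; exact hgmin y hy h
    · rw [hgp, h]; simp; omega
    · rw [hgp, h]; simp; omega
  | none =>
    cases hF1 : pool.find? (fun gene => PySem.Set.contains avail gene && (genePrio gt td gene == (1:Int))) with
    | some g =>
      obtain ⟨hgc, hgp, hgmin⟩ := F_some pool avail gt td 1 hF1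
      refine ⟨g, by simp only [pickTier, hfind, hF0, hF1], hgc, ?_⟩
      intro y hy
      obtain ⟨hyl, -, -⟩ := poolIdx_spec pool y (List.mem_filter.1 hy).1
      obtain ⟨hgl, -, -⟩ := poolIdx_spec pool g (List.mem_filter.1 hgc).1
      unfold pvKey
      rcases genePrio_cases gt td y with h | h | h
      · exact absurd h (F_none pool avail gt td 0 hF0 y hy)
      · rw [hgp, h]; simp; exact hgmin y hy h
      · rw [hgp, h]; simp; omega
    | none =>
      cases hF2 : pool.find? (fun gene => PySem.Set.contains avail gene && (genePrio gt td gene == (2:Int))) with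
      | some g =>
        obtain ⟨hgc, hgp, hgmin⟩ := F_some pool avail gt td 2 hF2
        refine ⟨g, by simp only [pickTier, hfind, hF0, hF1, hF2], hgc, ?_⟩
        intro y hy
        obtain ⟨hyl, -, -⟩ := poolIdx_spec pool y (List.mem_filter.1 hy).1
        obtain ⟨hgl, -, -⟩ := poolIdx_spec pool g (List.mem_filter.1 hgc).1
        unfold pvKey
        rcases genePrio_cases gt td y with h | h | h
        · exact absurd h (F_none pool avail gt td 0 hF0 y hy)
        · exact absurd h (F_none pool avail gt td 1 hF1 y hy)
        · rw [hgp, h]; simp; exact hgmin y hy h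
      | none =>
        exfalso
        obtain ⟨y, hy⟩ := List.exists_mem_of_ne_nil _ hne
        rcases genePrio_cases gt td y with h | h | h
        · exact F_none pool avail gt td 0 hF0 y hy h
        · exact F_none pool avail gt td 1 hF1 y hy h
        · exact F_none pool avail gt td 2 hF2 y hy h

-- ===== VERDICT (by name: the statement is the Claim_ definition above) =====
theorem choose_gene_from_pool_spec : Claim_equal_choose_gene_from_pool := by
  intro pool avail gt td _
  unfold Spec_choose_gene_from_pool
  by_cases hc : pool.filter (fun gene => PySem.Set.contains avail gene) = []
  · have hnone : ∀ l : Int,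
        pool.find? (fun gene => PySem.Set.contains avail gene && (genePrio gt td gene == l)) = none := by
      intro l
      cases h : pool.find? (fun gene => PySem.Set.contains avail gene && (genePrio gt td gene == l)) with
      | none => rfl
      | some g =>
        have := (F_some pool avail gt td l h).1
        rw [hc] at this
        simp at this
    unfold choose_gene_from_pool choose_gene_from_pool_alt
    simp only [hc, if_pos, pickTier, find_level_eq pool avail gt td, hnone 0, hnone 1, hnone 2]
  · obtain ⟨m, hA, hmc, hmin⟩ := A_char pool avail gt td hc
    obtain ⟨b, hB, hbc, hbmin⟩ := B_char pool avail gt td hc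
    rw [hA, hB]
    have h1 := hmin b hbc
    have h2 := hbmin m hmc
    have hmb : m = b := pvKey_inj pool gt td (List.mem_filter.1 hmc).1 (List.mem_filter.1 hbc).1
      (le_antisymm h1 h2)
    rw [hmb]
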